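-- pv_equiv track=rewrite | github.com/diogo-alcoba/FP | FP_Projeto_1.py | eh_labirinto
-- ===== SOURCE A (Python) =====
-- def eh_labirinto(lab):
--     #eh_labirinto: universal --> booleano
--     '''Esta funcao recebe um argumento de qualquer tipo e devolve 'True' se
--     o seu argumento corresponde a um labirinto e 'False' caso contrario'''
--     if type(lab) is not tuple:
--         return(False) #verificar que o input e um tuplo
--     elif len(lab)<3:
--         return(False) #verificar que o tuplo tem pelo menos 3 tuplos
--     for i in lab:
--         if type(i) is not tuple:
--                 return(False) #verificar que o tuplo de input contem apenas tuplos
--         elif len(i)<3: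
--                 return(False) #verificar que sao 3 ou mais
--         elif len(i)!=len(lab[0]):
--                 return(False) #verificar que todos os tuplos dentro do tuplo de input tem o mesmo tamanho
--         for j in i:
--             if not isinstance(j,int):
--                 return(False)
--             if j!=0 and j!=1:
--                 return(False) #verificar que os tuplos apenas contem 0's e 1's e mais nenhum numero ou caracter
--             elif i[0]==0 or i[-1]==0:
--                 return(False) #verificar que todos os tuplos comecam e acabam com  1
--             elif not (lab[0][1:]==lab[0][:-1] and lab[-1][1:]==lab[-1][:-1]):
--                 return(False)  #verificar que o primeiro e ultimo tuplo sao apenas constituidos por 1's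
--     return(True)
-- ===== SOURCE B (Python) =====
-- def eh_labirinto(lab):
--     # B: staged validation passes instead of A's nested early-return loops.
--     if type(lab) is not tuple or len(lab) < 3:
--         return False
--     n = len(lab[0])
--     if not all(type(r) is tuple and len(r) >= 3 and len(r) == n for r in lab):
--         return False
--     if not all(isinstance(j, int) and (j == 0 or j == 1) for r in lab for j in r):
--         return False
--     if not all(r[0] == 1 and r[-1] == 1 for r in lab):
--         return False
--     return all(x == 1 for x in lab[0]) and all(x == 1 for x in lab[-1])
-- ===== Notes on version B (the rewrite author's own statement) =====
-- stated objective: simpler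
-- what changed: Replaced A's nested per-cell early-return loops (which re-check the row edges and the top/bottom border uniformity on every cell) with staged whole-structure passes: shape pass, cell-value pass, row-edge pass, and a single all-ones check of the first and last rows.
import Mathlib
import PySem

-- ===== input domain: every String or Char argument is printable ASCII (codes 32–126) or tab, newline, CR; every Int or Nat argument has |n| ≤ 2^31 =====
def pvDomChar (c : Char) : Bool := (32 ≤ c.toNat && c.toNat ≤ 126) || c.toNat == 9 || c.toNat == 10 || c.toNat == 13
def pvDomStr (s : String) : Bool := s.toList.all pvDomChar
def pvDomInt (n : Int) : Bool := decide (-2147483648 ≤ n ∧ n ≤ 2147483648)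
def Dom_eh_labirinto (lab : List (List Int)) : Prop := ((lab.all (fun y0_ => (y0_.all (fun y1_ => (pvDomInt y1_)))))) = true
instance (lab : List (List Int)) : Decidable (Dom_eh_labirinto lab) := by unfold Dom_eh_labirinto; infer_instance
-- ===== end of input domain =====

-- B validates the maze in staged whole-structure passes (shape, cell values, row edges, one border pass)
-- instead of A's nested per-cell early-return loops; same return value on every input.

-- ===== PORT A =====
-- the inner 'for j in i' loop: 'some false' = early 'return False', 'none' = loop finished.
-- ('type(...) is tuple' and 'isinstance(j, int)' are identically true on List (List Int) and are dropped.)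
def ehCellsA (lab : List (List Int)) (i : List Int) : List Int → Option Bool
  | [] => none
  | j :: rest =>
    if ¬(j = 0 ∨ j = 1) then some false
    else if PySem.List.pyGet? i 0 = some 0 ∨ PySem.List.pyGet? i (-1) = some 0 then some false
    else if ¬(PySem.List.slice (lab.headD []) (some 1) none
                = PySem.List.slice (lab.headD []) none (some (-1))
              ∧ PySem.List.slice ((PySem.List.pyGet? lab (-1)).getD []) (some 1) none
                = PySem.List.slice ((PySem.List.pyGet? lab (-1)).getD []) none (some (-1))) then some false
    else ehCellsA lab i rest

-- the outer 'for i in lab' loop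
def ehRowsA (lab : List (List Int)) : List (List Int) → Bool
  | [] => true
  | i :: rest =>
    if i.length < 3 then false
    else if i.length ≠ (lab.headD []).length then false
    else match ehCellsA lab i i with
      | some b => b
      | none => ehRowsA lab rest


def eh_labirinto (lab : List (List Int)) : Bool :=
  if lab.length < 3 then false
  else ehRowsA lab lab

-- ===== PORT B =====
def eh_labirinto_alt (lab : List (List Int)) : Bool :=
  if lab.length < 3 then false
  else
    let n := (lab.headD []).length
    if ¬(lab.all fun r => decide (3 ≤ r.length) && decide (r.length = n)) then false
    else if ¬(lab.all fun r => r.all fun j => j == 0 || j == 1) then false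
    else if ¬(lab.all fun r =>
                PySem.List.pyGet? r 0 == some 1 && PySem.List.pyGet? r (-1) == some 1) then false
    else (lab.headD []).all (fun x => x == 1)
         && ((PySem.List.pyGet? lab (-1)).getD []).all (fun x => x == 1)

-- ===== PRECONDITION & SPEC =====
def Spec_eh_labirinto (lab : List (List Int)) (out : Bool) : Prop := out = eh_labirinto_alt lab
instance (lab : List (List Int)) (out : Bool) : Decidable (Spec_eh_labirinto lab out) := by unfold Spec_eh_labirinto; infer_instance

-- ===== CLAIM (what is proved, stated in full; the proofs are below) =====
def Claim_equal_eh_labirinto : Prop := ∀ (lab : List (List Int)), Dom_eh_labirinto lab → Spec_eh_labirinto lab (eh_labirinto lab)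

-- ===== LEMMAS AND PROOFS =====

-- the constant condition A re-checks for every cell: first and last row of the maze are uniform
def UnifA (lab : List (List Int)) : Prop :=
  PySem.List.slice (lab.headD []) (some 1) none = PySem.List.slice (lab.headD []) none (some (-1))
  ∧ PySem.List.slice ((PySem.List.pyGet? lab (-1)).getD []) (some 1) none
      = PySem.List.slice ((PySem.List.pyGet? lab (-1)).getD []) none (some (-1))

theorem cellsA_ne_some_true (lab : List (List Int)) (i cs : List Int) :
    ehCellsA lab i cs ≠ some true := by
  induction cs with
  | nil => simp [ehCellsA]
  | cons j rest ih =>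
    unfold ehCellsA
    split_ifs <;> simp_all

theorem cellsA_eq_none_iff (lab : List (List Int)) (i cs : List Int) :
    ehCellsA lab i cs = none ↔
      (∀ j ∈ cs, j = 0 ∨ j = 1) ∧
      (cs ≠ [] → ¬(PySem.List.pyGet? i 0 = some 0 ∨ PySem.List.pyGet? i (-1) = some 0) ∧ UnifA lab) := by
  induction cs with
  | nil => simp [ehCellsA]
  | cons j rest ih =>
    unfold ehCellsA
    by_cases hj : j = 0 ∨ j = 1
    · rw [if_neg (not_not_intro hj)]
      by_cases he : PySem.List.pyGet? i 0 = some 0 ∨ PySem.List.pyGet? i (-1) = some 0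
      · rw [if_pos he]
        constructor
        · intro h; exact absurd h (Option.some_ne_none _)
        · rintro ⟨-, hc⟩; exact absurd he (hc (by simp)).1
      · rw [if_neg he]
        by_cases hu : PySem.List.slice (lab.headD []) (some 1) none
                        = PySem.List.slice (lab.headD []) none (some (-1))
                      ∧ PySem.List.slice ((PySem.List.pyGet? lab (-1)).getD []) (some 1) none
                        = PySem.List.slice ((PySem.List.pyGet? lab (-1)).getD []) none (some (-1))
        · rw [if_neg (not_not_intro hu), ih]
          constructor
          · rintro ⟨hb, -⟩
            refine ⟨fun x hx => ?_, fun _ => ⟨he, hu⟩⟩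
            rcases List.mem_cons.mp hx with h | h
            · exact h ▸ hj
            · exact hb x h
          · rintro ⟨hb, -⟩
            exact ⟨fun x hx => hb x (List.mem_cons_of_mem _ hx), fun _ => ⟨he, hu⟩⟩
        · rw [if_pos hu]
          constructor
          · intro h; exact absurd h (Option.some_ne_none _)
          · rintro ⟨-, hc⟩; exact absurd (hc (by simp)).2 hu
    · rw [if_pos hj]
      constructor
      · intro h; exact absurd h (Option.some_ne_none _)
      · rintro ⟨hb, -⟩; exact absurd (hb j (by simp)) hj

theorem rowsA_eq_true_iff (lab rows : List (List Int)) :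
    ehRowsA lab rows = true ↔
      ∀ i ∈ rows, 3 ≤ i.length ∧ i.length = (lab.headD []).length ∧ ehCellsA lab i i = none := by
  induction rows with
  | nil => simp [ehRowsA]
  | cons i rest ih =>
    unfold ehRowsA
    split_ifs with h1 h2
    · simp only [false_iff]; intro h; exact absurd (h i (by simp)).1 (by omega)
    · simp only [false_iff]; intro h; exact absurd (h i (by simp)).2.1 h2
    · rcases hc : ehCellsA lab i i with _ | b
      · simp only [ih]
        constructor
        · intro h
          intro x hx
          rcases List.mem_cons.mp hx with h' | h'
          · subst h'; exact ⟨by omega, by omega, hc⟩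
          · exact h x h'
        · intro h x hx; exact h x (List.mem_cons_of_mem _ hx)
      · have hb : b = false := by
          cases b
          · rfl
          · exact absurd hc (cellsA_ne_some_true lab i i)
        subst hb
        refine iff_of_false (by simp) ?_
        intro h
        exact absurd (h i (by simp)).2.2 (by simp [hc])

theorem uniform_iff_const (a : Int) (l : List Int) :
    ((a :: l).tail = (a :: l).dropLast) ↔ ∀ x ∈ a :: l, x = a := by
  induction l generalizing a with
  | nil => simp
  | cons b t ih =>
    have h1 : ((a :: b :: t).tail = (a :: b :: t).dropLast) ↔ (b = a ∧ (b :: t).tail = (b :: t).dropLast) := by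
      simp only [List.tail_cons, List.dropLast_cons₂, List.cons.injEq]
    rw [h1, ih b]
    constructor
    · rintro ⟨hb, hall⟩ x hx
      rcases List.mem_cons.mp hx with h | h
      · exact h ▸ rfl
      · exact (hall x h).trans hb
    · intro h
      refine ⟨h b (by simp), fun x hx => ?_⟩
      rw [h x (List.mem_cons_of_mem _ hx), h b (by simp)]

theorem slice_unif_iff (a : Int) (t : List Int) :
    (PySem.List.slice (a :: t) (some 1) none = PySem.List.slice (a :: t) none (some (-1)))
      ↔ ∀ x ∈ a :: t, x = a := by
  rw [PySem.List.slice_from_one, PySem.List.slice_to_neg_one]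
  exact uniform_iff_const a t

theorem edge_iff (i : List Int) (hne : i ≠ []) (hbin : ∀ j ∈ i, j = 0 ∨ j = 1) :
    (¬(PySem.List.pyGet? i 0 = some 0 ∨ PySem.List.pyGet? i (-1) = some 0))
      ↔ (PySem.List.pyGet? i 0 = some 1 ∧ PySem.List.pyGet? i (-1) = some 1) := by
  obtain ⟨a, t, rfl⟩ : ∃ a t, i = a :: t := by
    cases i with
    | nil => exact absurd rfl hne
    | cons a t => exact ⟨a, t, rfl⟩
  rw [PySem.List.pyGet?_zero_cons, PySem.List.pyGet?_neg_one]
  have hlast : (a :: t).getLast? = some ((a :: t).getLast (by simp)) := List.getLast?_eq_some_getLast (by simp)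
  rw [hlast]
  have ha := hbin a (by simp)
  have hb := hbin _ (List.getLast_mem (l := a :: t) (by simp))
  simp only [Option.some.injEq, not_or]
  constructor
  · rintro ⟨h1, h2⟩
    refine ⟨?_, ?_⟩
    · rcases ha with h | h
      · exact absurd h h1
      · exact h
    · rcases hb with h | h
      · exact absurd h h2
      · exact h
  · rintro ⟨h1, h2⟩; exact ⟨by omega, by omega⟩
theorem main_eq (lab : List (List Int)) : eh_labirinto lab = eh_labirinto_alt lab := by
  unfold eh_labirinto eh_labirinto_alt
  by_cases hlen : lab.length < 3
  · rw [if_pos hlen, if_pos hlen]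
  · rw [if_neg hlen, if_neg hlen]
    push_neg at hlen
    obtain ⟨r, rest, rfl⟩ : ∃ a t, lab = a :: t := by
      cases lab with
      | nil => simp at hlen
      | cons a t => exact ⟨a, t, rfl⟩
    set lab := r :: rest with hlab
    have hhead : lab.headD [] = r := rfl
    have hLLmem : ((PySem.List.pyGet? lab (-1)).getD []) ∈ lab := by
      rw [PySem.List.pyGet?_neg_one,
          List.getLast?_eq_some_getLast (l := lab) (by simp [hlab])]
      exact List.getLast_mem _
    set LL := ((PySem.List.pyGet? lab (-1)).getD []) with hLL
    rw [Bool.eq_iff_iff]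
    rw [rowsA_eq_true_iff]
    simp only [cellsA_eq_none_iff, hhead]
    -- characterize B's if-chain
    constructor
    · intro H
      have hU : UnifA lab := by
        have h0 := H r (by simp [hlab])
        have hrne0 : r ≠ [] := by
          intro h
          have h1 := h0.1
          rw [h] at h1; simp at h1
        exact (h0.2.2.2 hrne0).2
      have hrne : ∀ i ∈ lab, i ≠ [] := by
        intro i hi h
        have := (H i hi).1
        rw [h] at this; simp at this
      have hedge : ∀ i ∈ lab, PySem.List.pyGet? i 0 = some 1 ∧ PySem.List.pyGet? i (-1) = some 1 := by
        intro i hi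
        exact (edge_iff i (hrne i hi) (H i hi).2.2.1).mp ((H i hi).2.2.2 (hrne i hi)).1
      have hones : ∀ l ∈ lab,
          (PySem.List.slice l (some 1) none = PySem.List.slice l none (some (-1))) →
          ∀ x ∈ l, x = 1 := by
        intro l hl hu x hx
        obtain ⟨a, t, rfl⟩ : ∃ a t, l = a :: t := by
          cases l with
          | nil => exact absurd rfl (hrne _ hl)
          | cons a t => exact ⟨a, t, rfl⟩
        have ha : a = 1 := by
          have := (hedge _ hl).1
          rw [PySem.List.pyGet?_zero_cons] at this
          exact Option.some.inj this
        exact ha ▸ (slice_unif_iff a t).mp hu x hx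
      have hS : (lab.all fun r' => decide (3 ≤ r'.length) && decide (r'.length = r.length)) = true := by
        simp only [List.all_eq_true, Bool.and_eq_true, decide_eq_true_iff]
        exact fun i hi => ⟨(H i hi).1, (H i hi).2.1⟩
      have hC : (lab.all fun r' => r'.all fun j => j == 0 || j == 1) = true := by
        simp only [List.all_eq_true, Bool.or_eq_true, beq_iff_eq]
        exact fun i hi j hj => (H i hi).2.2.1 j hj
      have hE : (lab.all fun r' =>
          PySem.List.pyGet? r' 0 == some 1 && PySem.List.pyGet? r' (-1) == some 1) = true := by
        simp only [List.all_eq_true, Bool.and_eq_true, beq_iff_eq]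
        exact fun i hi => hedge i hi
      rw [if_neg (by simp [hS]), if_neg (by simp [hC]), if_neg (by simp [hE])]
      simp only [Bool.and_eq_true, List.all_eq_true, beq_iff_eq, hhead]
      exact ⟨fun x hx => hones r (by simp [hlab]) hU.1 x hx,
             fun x hx => hones LL hLLmem hU.2 x hx⟩
    · intro H
      by_cases hS : (lab.all fun r' => decide (3 ≤ r'.length) && decide (r'.length = r.length)) = true
      case neg => rw [if_pos (by simp [hS])] at H; exact absurd H (by simp)
      by_cases hC : (lab.all fun r' => r'.all fun j => j == 0 || j == 1) = true
      case neg => rw [if_neg (by simp [hS]), if_pos (by simp [hC])] at H; exact absurd H (by simp)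
      by_cases hE : (lab.all fun r' =>
          PySem.List.pyGet? r' 0 == some 1 && PySem.List.pyGet? r' (-1) == some 1) = true
      case neg => rw [if_neg (by simp [hS]), if_neg (by simp [hC]), if_pos (by simp [hE])] at H
                  exact absurd H (by simp)
      rw [if_neg (by simp [hS]), if_neg (by simp [hC]), if_neg (by simp [hE])] at H
      simp only [Bool.and_eq_true, List.all_eq_true, beq_iff_eq, hhead] at H
      simp only [List.all_eq_true, Bool.and_eq_true, decide_eq_true_iff] at hS
      simp only [List.all_eq_true, Bool.or_eq_true, beq_iff_eq] at hC
      simp only [List.all_eq_true, Bool.and_eq_true, beq_iff_eq] at hE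
      have hU : UnifA lab := by
        constructor
        · obtain ⟨a, t, hr⟩ : ∃ a t, r = a :: t := by
            have := (hS r (by simp [hlab])).1
            cases r with
            | nil => simp at this
            | cons a t => exact ⟨a, t, rfl⟩
          rw [hhead, hr, slice_unif_iff]
          have ha : a = 1 := by
            have := (hE r (by simp [hlab])).1
            rw [hr, PySem.List.pyGet?_zero_cons] at this
            exact Option.some.inj this
          intro x hx
          rw [ha]
          exact H.1 x (hr ▸ hx)
        · obtain ⟨a, t, hr⟩ : ∃ a t, LL = a :: t := by
            have := (hS LL hLLmem).1
            cases hLL2 : LL with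
            | nil => rw [hLL2] at this; simp at this
            | cons a t => exact ⟨a, t, rfl⟩
          show PySem.List.slice LL (some 1) none = PySem.List.slice LL none (some (-1))
          rw [hr, slice_unif_iff]
          have ha : a = 1 := by
            have := (hE LL hLLmem).1
            rw [hr, PySem.List.pyGet?_zero_cons] at this
            exact Option.some.inj this
          intro x hx
          rw [ha]
          exact H.2 x (hr ▸ hx)
      intro i hi
      have hne : i ≠ [] := by
        intro h
        have := (hS i hi).1
        rw [h] at this; simp at this
      exact ⟨(hS i hi).1, (hS i hi).2, hC i hi,
             fun _ => ⟨(edge_iff i hne (hC i hi)).mpr (hE i hi), hU⟩⟩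

-- ===== VERDICT (by name: the statement is the Claim_ definition above) =====
theorem eh_labirinto_spec : Claim_equal_eh_labirinto := by
  intro lab _
  unfold Spec_eh_labirinto
  exact main_eq lab
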